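-- pv_equiv track=rewrite | github.com/Krissuper11/Python | MX/mx_pyramid/pyramid.py | join_pyramids
-- ===== SOURCE A (Python) =====
-- def join_pyramids(pyramid_a: list, pyramid_b: list) -> list:
--     """
--     Join together two pyramid lists.
--
--     Get 2 pyramid lists as inputs. Join them together horizontally. If the the pyramid heights are not equal, add empty lines on the top until they are equal.
--     join_pyramids(make_pyramid(3, "A"), make_pyramid(6, 'a')) ->
--     [
--         [' ', ' ', ' ', ' ', ' ', 'a', 'a', ' ', ' '],
--         [' ', 'A', ' ', ' ', 'a', 'a', 'a', 'a', ' '],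
--         ['A', 'A', 'A', 'a', 'a', 'a', 'a', 'a', 'a']
--     ]
--
--     :param pyramid_a: list
--     :param pyramid_b: list
--     :return: list
--     """
--     counter = 0
--     base_a = len(pyramid_a[len(pyramid_a) - 1])
--     base_b = len(pyramid_b[len(pyramid_b) - 1])
--     if base_a > base_b:
--         for i in range(len(pyramid_a)):
--             if len(pyramid_a) - len(pyramid_b) > i:
--                 pyramid_a[i] += [' ' for i in range(base_b)]
--             else:
--                 pyramid_a[i] += pyramid_b[counter]
--                 counter += 1
--         return pyramid_a
--     else:
--         for i in range(len(pyramid_b)):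
--             if len(pyramid_b) - len(pyramid_a) > i:
--                 pyramid_b[i] = [' ' for i in range(base_a)] + pyramid_b[i]
--             else:
--                 pyramid_b[i] = pyramid_a[counter] + pyramid_b[i]
--                 counter += 1
--         return pyramid_b
-- ===== SOURCE B (Python) =====
-- def join_pyramids(pyramid_a: list, pyramid_b: list) -> list:
--     if len(pyramid_a[len(pyramid_a) - 1]) > len(pyramid_b[len(pyramid_b) - 1]):
--         pad = [' '] * len(pyramid_b[len(pyramid_b) - 1])
--         pyramid_a[:] = _join_rows(pyramid_a, pyramid_b,
--                                   len(pyramid_a) - len(pyramid_b), pad, False)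
--         return pyramid_a
--     pad = [' '] * len(pyramid_a[len(pyramid_a) - 1])
--     pyramid_b[:] = _join_rows(pyramid_b, pyramid_a,
--                               len(pyramid_b) - len(pyramid_a), pad, True)
--     return pyramid_b
--
--
-- def _join_rows(main, other, gap, pad, pad_left):
--     """Recursively join rows: while gap > 0 glue the pad, then glue other's rows."""
--     if not main:
--         return []
--     if gap > 0:
--         head = (pad + main[0]) if pad_left else (main[0] + pad)
--         return [head] + _join_rows(main[1:], other, gap - 1, pad, pad_left)
--     head = (other[0] + main[0]) if pad_left else (main[0] + other[0])
--     return [head] + _join_rows(main[1:], other[1:], gap, pad, pad_left)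
-- ===== Notes on version B (the rewrite author's own statement) =====
-- stated objective: alternative
-- what changed: Replaces A's indexed in-place mutation loop with a counter by a pure structural recursion that consumes both row lists (gluing pad rows while the height gap is positive, then paired rows), assigned back once; B mutates/returns the same argument object as A, though A additionally mutates the individual row lists while B builds fresh rows.
import Mathlib
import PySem

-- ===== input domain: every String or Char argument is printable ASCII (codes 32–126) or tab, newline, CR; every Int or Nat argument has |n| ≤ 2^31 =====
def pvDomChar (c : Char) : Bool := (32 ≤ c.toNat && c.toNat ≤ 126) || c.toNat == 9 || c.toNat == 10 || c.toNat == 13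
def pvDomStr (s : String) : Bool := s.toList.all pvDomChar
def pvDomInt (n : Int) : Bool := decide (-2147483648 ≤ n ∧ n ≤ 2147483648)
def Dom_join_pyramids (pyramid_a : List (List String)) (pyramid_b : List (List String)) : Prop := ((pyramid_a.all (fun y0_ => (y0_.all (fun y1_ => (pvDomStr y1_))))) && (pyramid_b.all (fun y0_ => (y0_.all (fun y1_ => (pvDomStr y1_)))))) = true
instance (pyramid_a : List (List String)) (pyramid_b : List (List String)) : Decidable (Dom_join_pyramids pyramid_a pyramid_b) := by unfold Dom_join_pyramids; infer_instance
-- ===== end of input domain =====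

-- B replaces A's indexed in-place mutation loop (with a counter) by a pure structural
-- recursion consuming both row lists (objective: alternative). Both Pythons mutate and
-- return the same argument object; the equivalence proved here is about the return value
-- (A also mutates the individual row lists in place, B builds fresh rows).

-- ===== PORT A =====
def join_pyramids (pyramid_a : List (List String)) (pyramid_b : List (List String)) : List (List String) :=
  let la := pyramid_a.length
  let lb := pyramid_b.length
  let base_a := (pyramid_a.getD (la - 1) []).length
  let base_b := (pyramid_b.getD (lb - 1) []).length
  if base_a > base_b then
    ((List.range la).foldl (fun (st : List (List String) × Nat) (i : Nat) =>
      if (la : Int) - (lb : Int) > (i : Int) then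
        (st.1.set i (st.1.getD i [] ++ List.replicate base_b " "), st.2)
      else
        (st.1.set i (st.1.getD i [] ++ pyramid_b.getD st.2 []), st.2 + 1))
      (pyramid_a, 0)).1
  else
    ((List.range lb).foldl (fun (st : List (List String) × Nat) (i : Nat) =>
      if (lb : Int) - (la : Int) > (i : Int) then
        (st.1.set i (List.replicate base_a " " ++ st.1.getD i []), st.2)
      else
        (st.1.set i (pyramid_a.getD st.2 [] ++ st.1.getD i []), st.2 + 1))
      (pyramid_b, 0)).1

-- ===== PORT B =====
-- _join_rows from Source B; the `other = []` branch under `gap ≤ 0` is unreachable whenever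
-- gap = |main| - |other| (there Python B would raise IndexError, like A on empty input).
def joinRows (main other : List (List String)) (gap : Int) (pad : List String) (padLeft : Bool) : List (List String) :=
  match main with
  | [] => []
  | m :: ms =>
    if gap > 0 then
      (if padLeft then pad ++ m else m ++ pad) :: joinRows ms other (gap - 1) pad padLeft
    else
      match other with
      | [] => []
      | o :: os => (if padLeft then o ++ m else m ++ o) :: joinRows ms os gap pad padLeft

def join_pyramids_alt (pyramid_a : List (List String)) (pyramid_b : List (List String)) : List (List String) :=
  if (pyramid_a.getD (pyramid_a.length - 1) []).length > (pyramid_b.getD (pyramid_b.length - 1) []).length then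
    joinRows pyramid_a pyramid_b ((pyramid_a.length : Int) - (pyramid_b.length : Int))
      (List.replicate (pyramid_b.getD (pyramid_b.length - 1) []).length " ") false
  else
    joinRows pyramid_b pyramid_a ((pyramid_b.length : Int) - (pyramid_a.length : Int))
      (List.replicate (pyramid_a.getD (pyramid_a.length - 1) []).length " ") true

-- ===== PRECONDITION & SPEC =====
-- Pre_ excludes exactly the inputs where the Python A raises IndexError (an empty pyramid list);
-- B raises the same IndexError there.
def Pre_join_pyramids (pyramid_a : List (List String)) (pyramid_b : List (List String)) : Prop :=
  pyramid_a ≠ [] ∧ pyramid_b ≠ []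
instance (pyramid_a : List (List String)) (pyramid_b : List (List String)) : Decidable (Pre_join_pyramids pyramid_a pyramid_b) := by unfold Pre_join_pyramids; infer_instance
def pvWitness_join_pyramids : List (List String) × List (List String) := ([["A"]], [[" ", "a"], ["a", "a"]])
def Spec_join_pyramids (pyramid_a : List (List String)) (pyramid_b : List (List String)) (out : List (List String)) : Prop := out = join_pyramids_alt pyramid_a pyramid_b
instance (pyramid_a : List (List String)) (pyramid_b : List (List String)) (out : List (List String)) : Decidable (Spec_join_pyramids pyramid_a pyramid_b out) := by unfold Spec_join_pyramids; infer_instance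

-- ===== CLAIM (what is proved, stated in full; the proofs are below) =====
def Claim_equal_join_pyramids : Prop := ∀ (pyramid_a : List (List String)) (pyramid_b : List (List String)), Dom_join_pyramids pyramid_a pyramid_b → Pre_join_pyramids pyramid_a pyramid_b → Spec_join_pyramids pyramid_a pyramid_b (join_pyramids pyramid_a pyramid_b)

-- ===== LEMMAS AND PROOFS =====

-- A's set/counter loop over `List.range l.length` with branch condition `i < t`, run for j
-- steps, yields the first j rows of `zipWith g l (replicate t rep ++ other)` and counter j - t.
theorem loop_inv (g : List String → List String → List String)
    (l other : List (List String)) (rep : List String) (t : Nat)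
    (hm : l.length ≤ t + other.length) (j : Nat) (hj : j ≤ l.length) :
    (List.range j).foldl (fun (st : List (List String) × Nat) i =>
        if i < t then (st.1.set i (g (st.1.getD i []) rep), st.2)
        else (st.1.set i (g (st.1.getD i []) (other.getD st.2 [])), st.2 + 1)) (l, 0)
      = ((List.zipWith g l (List.replicate t rep ++ other)).take j ++ l.drop j, j - t) := by
  induction j with
  | zero => simp
  | succ j ih =>
    have hjn : j < l.length := by omega
    rw [List.range_succ, List.foldl_append, ih (by omega)]
    set Z := List.zipWith g l (List.replicate t rep ++ other) with hZdef
    have hZ : Z.length = l.length := by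
      simp only [hZdef, List.length_zipWith, List.length_append, List.length_replicate]
      omega
    have hlen : (Z.take j).length = j := by simp; omega
    have hget : (Z.take j ++ l.drop j).getD j [] = l[j] := by
      rw [List.getD_eq_getElem?_getD, List.getElem?_append_right (by omega), hlen]
      simp [hjn]
    have hOj : (List.replicate t rep ++ other)[j]'(by simp; omega)
        = if j < t then rep else other.getD (j - t) [] := by
      by_cases h : j < t
      · rw [List.getElem_append_left (by simpa using h)]
        simp [h]
      · rw [List.getElem_append_right (by simpa using h)]
        have : j - (List.replicate t rep).length < other.length := by simp; omega
        simp only [List.length_replicate]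
        rw [List.getD_eq_getElem _ _ (by omega)]
        simp [h]
    have hZj : Z[j]'(by omega) = g l[j] (if j < t then rep else other.getD (j - t) []) := by
      simp only [hZdef, List.getElem_zipWith]
      exact congrArg (g _) hOj
    have hset : ∀ v, (Z.take j ++ l.drop j).set j v = Z.take j ++ (v :: l.drop (j+1)) := by
      intro v
      rw [List.set_append_right _ _ (by omega)]
      have h0 : j - (Z.take j).length = 0 := by omega
      rw [h0, List.drop_eq_getElem_cons hjn, List.set_cons_zero]
    have htake : Z.take (j+1) ++ l.drop (j+1)
        = Z.take j ++ (Z[j]'(by omega) :: l.drop (j+1)) := by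
      rw [List.take_add_one, List.getElem?_eq_getElem (show j < Z.length by omega)]
      rw [Option.toList_some, List.append_assoc, List.singleton_append]
    simp only [List.foldl_cons, List.foldl_nil]
    by_cases h : j < t
    · simp only [h, if_true, hget, hset]
      refine Prod.ext ?_ ?_
      · simp only [htake, hZj, if_pos h]
      · simp only []
        omega
    · simp only [if_neg h, hget, hset]
      refine Prod.ext ?_ ?_
      · simp only [htake, hZj, if_neg h]
      · simp only []
        omega

-- B's recursion, started with gap = |main| - |other|, computes the same zipWith form.
theorem joinRows_eq (pad : List String) (padLeft : Bool) :
    ∀ (main other : List (List String)),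
      joinRows main other ((main.length : Int) - (other.length : Int)) pad padLeft
        = List.zipWith (fun m o => if padLeft then o ++ m else m ++ o) main
            (List.replicate (main.length - other.length) pad ++ other) := by
  intro main
  induction main with
  | nil => intro other; simp [joinRows]
  | cons m ms ih =>
    intro other
    by_cases h : other.length < ms.length + 1
    · have hgap : ((m :: ms).length : Int) - (other.length : Int) > 0 := by simp; omega
      have hrep : (m :: ms).length - other.length = (ms.length - other.length) + 1 := by
        simp; omega
      rw [joinRows.eq_def]
      simp only []
      rw [if_pos hgap, hrep, List.replicate_succ]
      have hgap1 : ((m :: ms).length : Int) - (other.length : Int) - 1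
          = (ms.length : Int) - (other.length : Int) := by simp; omega
      rw [hgap1, ih other]
      simp
    · have hgap : ¬ (((m :: ms).length : Int) - (other.length : Int) > 0) := by simp; omega
      obtain ⟨o, os, rfl⟩ : ∃ o os, other = o :: os := by
        cases other with
        | nil => simp at h
        | cons o os => exact ⟨o, os, rfl⟩
      have hrep : (m :: ms).length - (o :: os).length = 0 := by
        simp only [List.length_cons] at h ⊢; omega
      rw [joinRows.eq_def]
      simp only []
      rw [if_neg hgap, hrep]
      have hgap2 : ((m :: ms).length : Int) - ((o :: os).length : Int)
          = (ms.length : Int) - (os.length : Int) := by simp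
      have hrep2 : ms.length - os.length = 0 := by simp at h ⊢; omega
      rw [hgap2, ih os]
      simp [hrep2]

theorem ports_eq (a b : List (List String)) :
    join_pyramids a b = join_pyramids_alt a b := by
  unfold join_pyramids join_pyramids_alt
  simp only []
  split
  · -- base_a > base_b : A's loop runs over a; t = la - lb, rows of b appended on the right
    have hcond : ∀ i : Nat, ((a.length : Int) - (b.length : Int) > (i : Int)) = (i < a.length - b.length) := by
      intro i; apply propext; omega
    simp only [hcond]
    rw [loop_inv (· ++ ·) a b (List.replicate ((b.getD (b.length-1) []).length) " ")
        (a.length - b.length) (by omega) a.length (le_refl _)]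
    rw [joinRows_eq]
    simp
  · -- else : A's loop runs over b; t = lb - la, rows of a prepended on the left
    have hcond : ∀ i : Nat, ((b.length : Int) - (a.length : Int) > (i : Int)) = (i < b.length - a.length) := by
      intro i; apply propext; omega
    simp only [hcond]
    rw [loop_inv (fun x y => y ++ x) b a (List.replicate ((a.getD (a.length-1) []).length) " ")
        (b.length - a.length) (by omega) b.length (le_refl _)]
    rw [joinRows_eq]
    have hZ : (List.zipWith (fun m o => o ++ m) b
        (List.replicate (b.length - a.length) (List.replicate ((a.getD (a.length-1) []).length) " ") ++ a)).length
        ≤ b.length := by simp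
    simp only [List.take_of_length_le hZ, List.drop_length, List.append_nil]
    simp

-- ===== VERDICT (by name: the statement is the Claim_ definition above) =====
theorem join_pyramids_spec : Claim_equal_join_pyramids := by
  intro a b _ _
  unfold Spec_join_pyramids
  exact ports_eq a b
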